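-- pv_equiv track=rewrite | github.com/Milefer7/ACD | service/exp2/array.py | binary_search_valley
-- ===== SOURCE A (Python) =====
-- def binary_search_valley(arr):  # 返回值，索引，比较次数
--     comparisons = 0
--     left, right = 0, len(arr) - 1
--     while left < right:
--         mid = (left + right) // 2
--         comparisons += 1
--         if arr[mid] < arr[mid + 1]:
--             right = mid
--         else:
--             left = mid + 1
--     return arr[left], left, comparisons
-- ===== SOURCE B (Python) =====
-- def binary_search_valley(arr):  # same value, index and comparison count as A
--     def go(seg, offset, count):
--         n = len(seg)
--         if n <= 1:
--             return seg[0], offset, count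
--         m = (n - 1) // 2
--         count += 1
--         if seg[m] < seg[m + 1]:
--             return go(seg[:m + 1], offset, count)
--         return go(seg[m + 1:], offset + m + 1, count)
--     return go(arr, 0, 0)
-- ===== Notes on version B (the rewrite author's own statement) =====
-- stated objective: alternative
-- what changed: B recurses over an explicitly shrinking sublist (slicing the kept half and carrying an index offset) instead of A's iterative two-pointer loop over fixed indices into the whole array.
import Mathlib
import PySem

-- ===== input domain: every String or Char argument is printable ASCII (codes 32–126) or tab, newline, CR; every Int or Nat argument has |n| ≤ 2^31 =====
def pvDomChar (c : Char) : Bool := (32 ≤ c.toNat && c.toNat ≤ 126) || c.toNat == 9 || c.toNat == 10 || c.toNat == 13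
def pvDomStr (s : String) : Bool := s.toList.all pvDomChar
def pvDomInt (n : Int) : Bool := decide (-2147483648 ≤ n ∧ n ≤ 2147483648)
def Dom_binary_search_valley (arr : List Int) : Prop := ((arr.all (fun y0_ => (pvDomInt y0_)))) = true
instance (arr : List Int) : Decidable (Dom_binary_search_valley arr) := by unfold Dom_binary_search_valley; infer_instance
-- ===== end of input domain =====

-- B recurses over an explicitly shrinking sublist (slicing the kept half, carrying an index
-- offset) instead of A's iterative two-pointer loop over fixed indices into the whole array.


-- ===== PORT A =====
-- A's while-loop over state (left, right, comparisons); fuel is only a totality guard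
-- (the interval [left, right] shrinks each iteration, so arr.length iterations always suffice;
-- the fuel-exhausted branch returns the loop state unchanged, like the loop exit).
def bsvLoop (arr : List Int) (fuel : Nat) (left right comparisons : Int) : Int × Int :=
  match fuel with
  | 0 => (left, comparisons)
  | fuel + 1 =>
    if left < right then
      let mid := PySem.Int.floordiv (left + right) 2
      if (PySem.List.pyGet? arr mid).getD 0 < (PySem.List.pyGet? arr (mid + 1)).getD 0 then
        bsvLoop arr fuel left mid (comparisons + 1)
      else
        bsvLoop arr fuel (mid + 1) right (comparisons + 1)
    else (left, comparisons)

def binary_search_valley (arr : List Int) : Int × Int × Int :=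
  let r := bsvLoop arr arr.length 0 ((arr.length : Int) - 1) 0
  ((PySem.List.pyGet? arr r.1).getD 0, r.1, r.2)

-- ===== PORT B =====
-- B's recursion: seg is the current sublist (a real slice), offset its start in arr; fuel is
-- only a totality guard (each call strictly shrinks seg, so arr.length suffices; the
-- fuel-exhausted branch returns what the n ≤ 1 base case returns).
def bsvSeg (fuel : Nat) (seg : List Int) (offset count : Int) : Int × Int × Int :=
  match fuel with
  | 0 => ((PySem.List.pyGet? seg 0).getD 0, offset, count)
  | fuel + 1 =>
    let n : Int := (seg.length : Int)
    if n ≤ 1 then ((PySem.List.pyGet? seg 0).getD 0, offset, count)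
    else
      let m := PySem.Int.floordiv (n - 1) 2
      if (PySem.List.pyGet? seg m).getD 0 < (PySem.List.pyGet? seg (m + 1)).getD 0 then
        bsvSeg fuel (PySem.List.slice seg none (some (m + 1))) offset (count + 1)
      else
        bsvSeg fuel (PySem.List.slice seg (some (m + 1)) none) (offset + m + 1) (count + 1)

def binary_search_valley_alt (arr : List Int) : Int × Int × Int :=
  bsvSeg arr.length arr 0 0

-- ===== PRECONDITION & SPEC =====
-- Pre_ excludes only the empty list, on which Python A raises IndexError (arr[0]); B raises there too.
def Pre_binary_search_valley (arr : List Int) : Prop := arr ≠ []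
instance (arr : List Int) : Decidable (Pre_binary_search_valley arr) := by unfold Pre_binary_search_valley; infer_instance
def pvWitness_binary_search_valley : List Int := [3, 1, 2]

def Spec_binary_search_valley (arr : List Int) (out : Int × Int × Int) : Prop := out = binary_search_valley_alt arr
instance (arr : List Int) (out : Int × Int × Int) : Decidable (Spec_binary_search_valley arr out) := by unfold Spec_binary_search_valley; infer_instance

-- ===== CLAIM (what is proved, stated in full; the proofs are below) =====
def Claim_equal_binary_search_valley : Prop := ∀ (arr : List Int), Dom_binary_search_valley arr → Pre_binary_search_valley arr → Spec_binary_search_valley arr (binary_search_valley arr)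

-- ===== LEMMAS AND PROOFS =====

-- element access inside a drop/take slice equals access in arr at the offset index
theorem getD_seg (arr : List Int) (l t k : Nat) (hk : k < t) (hkl : l + k < arr.length) :
    (PySem.List.pyGet? ((arr.drop l).take t) (k : Int)).getD 0
      = (PySem.List.pyGet? arr ((l : Int) + (k : Int))).getD 0 := by
  have h2 : PySem.List.pyGet? arr ((l : Int) + (k : Int)) = arr[l + k]? := by
    rw [show ((l : Int) + (k : Int)) = ((l + k : Nat) : Int) from by push_cast; ring,
      PySem.List.pyGet?_natCast]
  rw [h2]
  simp [pysem, hk, List.getElem?_drop, hkl, List.getElem?_take_of_lt]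

-- B's segment state for A's (l, r) is the slice arr[l .. r]: same value, index and count.
theorem bsvSeg_eq_bsvLoop (arr : List Int) (f : Nat) (l r : Nat) (c : Int)
    (hlr : l ≤ r) (hr : r < arr.length) (hf : r - l ≤ f) :
    bsvSeg f ((arr.drop l).take (r - l + 1)) (l : Int) c =
      ((PySem.List.pyGet? arr (bsvLoop arr f l r c).1).getD 0,
        (bsvLoop arr f l r c).1, (bsvLoop arr f l r c).2) := by
  induction f generalizing l r c with
  | zero =>
    have hlr' : l = r := by omega
    subst hlr'
    rw [bsvLoop, bsvSeg]
    have h0 := getD_seg arr l (l - l + 1) 0 (by omega) (by omega)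
    simp only [Nat.cast_zero, add_zero] at h0
    rw [h0]
  | succ f ih =>
    have hseg : ((arr.drop l).take (r - l + 1)).length = r - l + 1 := by
      simp only [List.length_take, List.length_drop]; omega
    rw [bsvSeg, bsvLoop]
    simp only [hseg]
    by_cases hl : l < r
    · have hc1 : ¬ (((r - l + 1 : Nat) : Int) ≤ 1) := by
        exact_mod_cast (show ¬ (r - l + 1 ≤ 1) from by omega)
      have hc2 : ((l : Nat) : Int) < ((r : Nat) : Int) := by exact_mod_cast hl
      rw [if_neg hc1, if_pos hc2]
      set k := (r - l) / 2 with hkdef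
      have hm : PySem.Int.floordiv (((r - l + 1 : Nat) : Int) - 1) 2 = ((k : Nat) : Int) := by
        rw [PySem.Int.floordiv_eq_ediv_of_pos (by norm_num : (0:Int) < 2)]
        omega
      have hmid : PySem.Int.floordiv ((l : Int) + (r : Int)) 2 = ((l + k : Nat) : Int) := by
        rw [PySem.Int.floordiv_eq_ediv_of_pos (by norm_num : (0:Int) < 2)]
        omega
      simp only [hm, hmid]
      have hk1 : ((k : Nat) : Int) + 1 = ((k + 1 : Nat) : Int) := by push_cast; ring
      have hlk1 : ((l + k : Nat) : Int) + 1 = ((l + (k + 1) : Nat) : Int) := by push_cast; ring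
      have hkr : k < r - l := by omega
      have e1 := getD_seg arr l (r - l + 1) k (by omega) (by omega)
      have e2 := getD_seg arr l (r - l + 1) (k + 1) (by omega) (by omega)
      have hcast1 : ((l + k : Nat) : Int) = (l : Int) + (k : Int) := by push_cast; ring
      have hcast2 : ((l + (k + 1) : Nat) : Int) = (l : Int) + ((k + 1 : Nat) : Int) := by push_cast; ring
      rw [hk1, hlk1, e1, hcast1.symm]
      rw [e2, hcast2.symm]
      by_cases hc : (PySem.List.pyGet? arr ((l + k : Nat) : Int)).getD 0 <
          (PySem.List.pyGet? arr ((l + (k + 1) : Nat) : Int)).getD 0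
      · rw [if_pos hc, if_pos hc]
        rw [PySem.List.slice_to _ (by positivity)]
        have hsl : (((arr.drop l).take (r - l + 1)).take (((k + 1 : Nat) : Int)).toNat)
            = (arr.drop l).take ((l + k) - l + 1) := by
          rw [List.take_take]
          simp only [Int.toNat_natCast]
          congr 1
          omega
        rw [hsl]
        exact ih l (l + k) (c + 1) (by omega) (by omega) (by omega)
      · rw [if_neg hc, if_neg hc]
        rw [PySem.List.slice_from _ (by positivity)]
        have hsl : (((arr.drop l).take (r - l + 1)).drop (((k + 1 : Nat) : Int)).toNat)
            = (arr.drop (l + (k + 1))).take (r - (l + (k + 1)) + 1) := by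
          rw [List.drop_take, List.drop_drop]
          simp only [Int.toNat_natCast]
          rw [show r - l + 1 - (k + 1) = r - (l + (k + 1)) + 1 from by omega]
        rw [hsl]
        have ihn := ih (l + (k + 1)) r (c + 1) (by omega) (by omega) (by omega)
        rw [hlk1, ihn]
    · have hlr' : l = r := by omega
      have hc1 : (((r - l + 1 : Nat) : Int) ≤ 1) := by
        exact_mod_cast (show r - l + 1 ≤ 1 from by omega)
      have hc2 : ¬ (((l : Nat) : Int) < ((r : Nat) : Int)) := by
        exact_mod_cast (show ¬ (l < r) from by omega)
      rw [if_pos hc1, if_neg hc2]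
      subst hlr'
      have h0 := getD_seg arr l (l - l + 1) 0 (by omega) (by omega)
      simp only [Nat.cast_zero, add_zero] at h0
      rw [h0]

-- ===== VERDICT (by name: the statement is the Claim_ definition above) =====
theorem binary_search_valley_spec : Claim_equal_binary_search_valley := by
  intro arr _ hne
  unfold Spec_binary_search_valley binary_search_valley binary_search_valley_alt
  have hlen : 0 < arr.length := List.length_pos_iff.mpr hne
  have h := bsvSeg_eq_bsvLoop arr arr.length 0 (arr.length - 1) 0 (by omega) (by omega) (by omega)
  simp only [List.drop_zero, Nat.cast_zero] at h
  rw [show arr.length - 1 - 0 + 1 = arr.length from by omega, List.take_length] at h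
  rw [show ((arr.length : Int) - 1) = ((arr.length - 1 : Nat) : Int) from by omega]
  exact h.symm
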